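-- pv_equiv track=rewrite | github.com/mpettersson/PythonReview | questions/list/num_geometric_progression_k_tuples.py | find_geometric_progression_k_tuples
-- ===== SOURCE A (Python) =====
-- from collections import defaultdict
--
-- def find_geometric_progression_k_tuples(l, r, k=3):
--
--     def _rec(d, k, i, a, result):
--         if len(a) == k:
--             result.append(a[:])
--         else:
--             if l[i] * r in d:
--                 for idx in d[l[i] * r]:
--                     if idx > i:
--                         a.append(idx)
--                         _rec(d, k, idx, a, result)
--                         a.pop()
--
--     if isinstance(l, list) and isinstance(r, int) and isinstance(k, int) and 0 <= k:
--         n = len(l)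
--         d = defaultdict(list)
--         result = []
--         for i, num in enumerate(l):
--             d[num].append(i)
--         for i in range(n):
--             _rec(d, k, i, [i], result)
--         return len(result)
-- ===== SOURCE B (Python) =====
-- def find_geometric_progression_k_tuples(l, r, k=3):
--     # DP by chain length: cnt[i] = number of GP chains of the current length
--     # starting at i; one right-to-left pass per length, with a dict keyed by value.
--     if k <= 0 or k > len(l):
--         return 0
--     cnt = [1] * len(l)
--     for _ in range(k - 1):
--         sums = {}
--         new = []
--         for x, c in zip(reversed(l), reversed(cnt)):
--             new.append(sums.get(x * r, 0))
--             sums[x] = sums.get(x, 0) + c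
--         new.reverse()
--         if not any(new):
--             return 0
--         cnt = new
--     return sum(cnt)
-- ===== Notes on version B (the rewrite author's own statement) =====
-- stated objective: alternative
-- what changed: A enumerates every geometric-progression index tuple by recursive backtracking over a value-to-indices dict (cost grows with the number of tuples, up to n^k); B never enumerates tuples: it counts them with a per-length dynamic program, one right-to-left pass per chain length over a value-keyed dict of partial-chain counts, with an early exit when no chain of the current length exists.
-- outside the precondition, e.g. on find_geometric_progression_k_tuples([1, 2], 2, -1): A returns None, B returns 0
import Mathlib
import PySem

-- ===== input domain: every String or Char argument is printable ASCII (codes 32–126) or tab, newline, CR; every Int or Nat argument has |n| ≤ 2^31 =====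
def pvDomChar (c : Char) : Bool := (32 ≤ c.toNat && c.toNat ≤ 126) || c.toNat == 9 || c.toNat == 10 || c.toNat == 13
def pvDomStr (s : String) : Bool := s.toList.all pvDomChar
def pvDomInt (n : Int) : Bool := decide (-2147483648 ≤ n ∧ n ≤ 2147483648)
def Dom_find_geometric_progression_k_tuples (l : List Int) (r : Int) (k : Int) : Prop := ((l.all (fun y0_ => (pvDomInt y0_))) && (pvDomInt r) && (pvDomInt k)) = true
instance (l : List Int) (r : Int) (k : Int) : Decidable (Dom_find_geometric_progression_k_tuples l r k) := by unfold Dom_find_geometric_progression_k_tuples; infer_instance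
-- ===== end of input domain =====

-- B replaces A's backtracking enumeration of every GP index tuple by a per-length
-- dynamic program over value-keyed count dictionaries (objective: alternative).

-- ===== PORT A =====
-- d built by `for i, num in enumerate(l): d[num].append(i)`
def pvBuildD (l : List Int) : PySem.Dict Int (List Int) :=
  (PySem.List.enumerate l).foldl (fun d p => d.modify p.2 [] (· ++ [p.1])) PySem.Dict.empty

-- `_rec`: fuel only bounds the recursion depth (one unit per level; the top level passes
-- l.length + k.toNat, which always suffices), the computation is otherwise literal.
def pvRecA (l : List Int) (r : Int) (d : PySem.Dict Int (List Int)) (k : Int) :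
    Nat → Int → List Int → List (List Int) → List (List Int)
  | fuel, i, a, result =>
    if (a.length : Int) = k then result ++ [a]
    else
      match fuel with
      | 0 => result
      | fuel + 1 =>
        -- l[i] : i is always a valid index in the executions A performs
        let key := PySem.List.pyGetD l i 0 * r
        if d.contains key then
          (d.getD key []).foldl
            (fun res idx => if i < idx then pvRecA l r d k fuel idx (a ++ [idx]) res else res)
            result
        else result
  termination_by fuel _ _ _ => fuel

def find_geometric_progression_k_tuples (l : List Int) (r : Int) (k : Int) : Int :=
  if 0 ≤ k then
    let n := l.length
    let d := pvBuildD l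
    let result := (PySem.List.pyRange 0 (n : Int) 1).foldl
      (fun res i => pvRecA l r d k (n + k.toNat) i [i] res) []
    (result.length : Int)
  else 0   -- Python returns None here (no value of the declared type); excluded by Pre_

-- ===== PORT B =====
-- one pass of B's DP: the inner `for x, c in zip(reversed(l), reversed(cnt))` loop,
-- followed by `new.reverse()`
def pvAltPass (l : List Int) (r : Int) (cnt : List Int) : List Int :=
  ((l.reverse.zip cnt.reverse).foldl
      (fun (st : PySem.Dict Int Int × List Int) xc =>
        (st.1.insert xc.1 (st.1.getD xc.1 0 + xc.2), st.2 ++ [st.1.getD (xc.1 * r) 0]))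
      (PySem.Dict.empty, [])).2.reverse

-- the `for _ in range(k - 1)` loop with its `if not any(new): return 0` early exit
def pvAltLoop (l : List Int) (r : Int) : Nat → List Int → Int
  | 0, cnt => cnt.sum
  | j + 1, cnt =>
    let new := pvAltPass l r cnt
    if new.all (fun c => c == 0) then 0 else pvAltLoop l r j new

def find_geometric_progression_k_tuples_alt (l : List Int) (r : Int) (k : Int) : Int :=
  if k ≤ 0 ∨ (l.length : Int) < k then 0
  else pvAltLoop l r (k.toNat - 1) (List.replicate l.length 1)

-- ===== PRECONDITION & SPEC =====
-- Pre_ excludes k < 0, where Python A falls through its guard and returns None (not an int).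
def Pre_find_geometric_progression_k_tuples (l : List Int) (r : Int) (k : Int) : Prop := 0 ≤ k
instance (l : List Int) (r : Int) (k : Int) : Decidable (Pre_find_geometric_progression_k_tuples l r k) := by unfold Pre_find_geometric_progression_k_tuples; infer_instance

def pvWitness_find_geometric_progression_k_tuples : List Int × Int × Int := ([1, 2, 4], 2, 3)

def Spec_find_geometric_progression_k_tuples (l : List Int) (r : Int) (k : Int) (out : Int) : Prop := out = find_geometric_progression_k_tuples_alt l r k
instance (l : List Int) (r : Int) (k : Int) (out : Int) : Decidable (Spec_find_geometric_progression_k_tuples l r k out) := by unfold Spec_find_geometric_progression_k_tuples; infer_instance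

-- ===== CLAIM (what is proved, stated in full; the proofs are below) =====
def Claim_equal_find_geometric_progression_k_tuples : Prop := ∀ (l : List Int) (r : Int) (k : Int), Dom_find_geometric_progression_k_tuples l r k → Pre_find_geometric_progression_k_tuples l r k → Spec_find_geometric_progression_k_tuples l r k (find_geometric_progression_k_tuples l r k)

-- ===== LEMMAS AND PROOFS =====

-- Reference counting functions (proof-side only).
-- pvS f w t = Σ over suffix decompositions t = … ++ x :: t' with x = w of f x t'
def pvS (f : Int → List Int → Int) (w : Int) : List Int → Int
  | [] => 0
  | x :: t => (if x = w then f x t else 0) + pvS f w t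

-- pvCnt r m x t = number of GP chains x, y₁, …, y_m picked in order from t with ratio r
def pvCnt (r : Int) : Nat → Int → List Int → Int
  | 0, _, _ => 1
  | m + 1, x, t => pvS (pvCnt r m) (x * r) t

-- pvTot r m t = Σ over suffix decompositions t = … ++ x :: t' of pvCnt r m x t'
def pvTot (r : Int) (m : Nat) : List Int → Int
  | [] => 0
  | x :: t => pvCnt r m x t + pvTot r m t

lemma pvEnumerate_append {α : Type} (xs ys : List α) : ∀ (s : Int),
    PySem.List.enumerate (xs ++ ys) s
      = PySem.List.enumerate xs s ++ PySem.List.enumerate ys (s + xs.length) := by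
  induction xs with
  | nil => intro s; simp [PySem.List.enumerate_nil]
  | cons x xs ih =>
    intro s
    simp [PySem.List.enumerate_cons, ih (s + 1)]
    ring_nf

lemma pvEnumerate_fst_bounds {α : Type} (xs : List α) : ∀ (s : Int) (p : Int × α),
    p ∈ PySem.List.enumerate xs s → s ≤ p.1 ∧ p.1 < s + xs.length := by
  induction xs with
  | nil => intro s p hp; simp [PySem.List.enumerate_nil] at hp
  | cons x xs ih =>
    intro s p hp
    rw [PySem.List.enumerate_cons] at hp
    rcases List.mem_cons.1 hp with hp | hp
    · subst hp
      refine ⟨le_refl _, ?_⟩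
      simp only [List.length_cons]
      push_cast
      omega
    · have := ih (s + 1) p hp
      simp only [List.length_cons]
      push_cast
      omega

-- characterization of the dict A builds: d[v] is the list of positions of v, in order
lemma pvBuildD_getD (l : List Int) (v : Int) :
    (pvBuildD l).getD v []
      = ((PySem.List.enumerate l).filter (fun p => p.2 == v)).map (·.1) := by
  unfold pvBuildD
  have h := PySem.Dict.getD_foldl_modify_append
      ((PySem.List.enumerate l).map (fun p : Int × Int => (p.2, p.1)))
      (PySem.Dict.empty : PySem.Dict Int (List Int)) v
  rw [List.foldl_map] at h
  simp only [PySem.Dict.getD_empty, List.nil_append, List.filter_map, List.map_map,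
    Function.comp_def] at h
  exact h

-- a sum of guarded terms vanishes when every index is ≤ i
lemma pvSum_vanish {α : Type} (i : Int) (g : Int × α → Int) (ps : List (Int × α))
    (h : ∀ p ∈ ps, p.1 ≤ i) :
    (ps.map (fun p => if i < p.1 then g p else 0)).sum = 0 := by
  apply List.sum_eq_zero
  intro x hx
  rcases List.mem_map.1 hx with ⟨p, hp, rfl⟩
  have := h p hp
  simp [show ¬ i < p.1 by omega]

-- the crux on a suffix: summing guarded chain counts over the positions of v in l.drop s
lemma pvCrux_drop (l : List Int) (r v : Int) (m : Nat) :
    ∀ (c s : Nat) (i : Int), l.length - s ≤ c → i < (s : Int) →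
      (((PySem.List.enumerate (l.drop s) (s : Int)).filter (fun p => p.2 == v)).map
          (fun p => if i < p.1 then pvCnt r m (PySem.List.pyGetD l p.1 0) (l.drop (p.1.toNat + 1)) else 0)).sum
        = pvS (pvCnt r m) v (l.drop s) := by
  intro c
  induction c with
  | zero =>
    intro s i hc hi
    have hs : l.length ≤ s := by omega
    simp [List.drop_eq_nil_of_le hs, PySem.List.enumerate_nil, pvS]
  | succ c ih =>
    intro s i hc hi
    by_cases hs : s < l.length
    · rw [List.drop_eq_getElem_cons hs, PySem.List.enumerate_cons]
      have hgetD : PySem.List.pyGetD l ((s : Int)) 0 = l[s] := by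
        rw [PySem.List.pyGetD_natCast]
        exact List.getD_eq_getElem l 0 hs
      have htoNat : ((s : Int)).toNat = s := Int.toNat_natCast s
      have hrest := ih (s + 1) i (by omega) (by push_cast; omega)
      push_cast at hrest
      by_cases hv : l[s] = v
      · rw [List.filter_cons_of_pos (by simpa using hv)]
        simp only [List.map_cons, List.sum_cons]
        rw [if_pos hi, hgetD, htoNat, hrest]
        simp [pvS, hv]
      · rw [List.filter_cons_of_neg (by simpa using hv)]
        rw [hrest]
        simp [pvS, hv]
    · have hs' : l.length ≤ s := by omega
      simp [List.drop_eq_nil_of_le hs', PySem.List.enumerate_nil, pvS]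

-- the crux over the whole list: the guard i < idx cuts the sum down to the suffix after i
lemma pvCrux (l : List Int) (r v : Int) (m : Nat) (i : Int) (hi : 0 ≤ i) :
    (((PySem.List.enumerate l).filter (fun p => p.2 == v)).map
        (fun p => if i < p.1 then pvCnt r m (PySem.List.pyGetD l p.1 0) (l.drop (p.1.toNat + 1)) else 0)).sum
      = pvS (pvCnt r m) v (l.drop (i.toNat + 1)) := by
  set s : Nat := i.toNat + 1 with hs
  by_cases hsn : s ≤ l.length
  · have hsplit : l = l.take s ++ l.drop s := (List.take_append_drop s l).symm
    have hlen : ((l.take s).length : Int) = (s : Int) := by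
      simp [List.length_take, Nat.min_eq_left hsn]
    have henum : PySem.List.enumerate l 0
        = PySem.List.enumerate (l.take s) 0 ++ PySem.List.enumerate (l.drop s) (s : Int) := by
      conv_lhs => rw [hsplit]
      rw [pvEnumerate_append]
      rw [show (0 : Int) + ((l.take s).length : Int) = (s : Int) by rw [hlen]; ring]
    rw [show PySem.List.enumerate l = PySem.List.enumerate (l.take s) 0 ++ PySem.List.enumerate (l.drop s) (s : Int) from henum]
    rw [List.filter_append, List.map_append, List.sum_append]
    have h1 : (((PySem.List.enumerate (l.take s) 0).filter (fun p => p.2 == v)).map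
        (fun p => if i < p.1 then pvCnt r m (PySem.List.pyGetD l p.1 0) (l.drop (p.1.toNat + 1)) else 0)).sum = 0 := by
      apply pvSum_vanish
      intro p hp
      have hb := pvEnumerate_fst_bounds (l.take s) 0 p (List.mem_of_mem_filter hp)
      have : ((l.take s).length : Int) = (s : Int) := hlen
      omega
    rw [h1, zero_add]
    exact pvCrux_drop l r v m l.length s i (by omega) (by omega)
  · -- i is past the end: both sides are 0
    have hdrop : l.drop s = [] := List.drop_eq_nil_of_le (by omega)
    rw [hdrop]
    have h0 : (((PySem.List.enumerate l).filter (fun p => p.2 == v)).map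
        (fun p => if i < p.1 then pvCnt r m (PySem.List.pyGetD l p.1 0) (l.drop (p.1.toNat + 1)) else 0)).sum = 0 := by
      apply pvSum_vanish
      intro p hp
      have hb := pvEnumerate_fst_bounds l 0 p (List.mem_of_mem_filter hp)
      omega
    rw [h0]
    simp [pvS]

-- generic length-of-fold lemma
lemma pvFoldLen {α : Type} (g : List (List Int) → α → List (List Int)) (h : α → Int) :
    ∀ (ds : List α) (res : List (List Int)),
      (∀ x ∈ ds, ∀ res', (((g res' x).length : Int) = (res'.length : Int) + h x)) →
      ((ds.foldl g res).length : Int) = (res.length : Int) + (ds.map h).sum := by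
  intro ds
  induction ds with
  | nil => intro res _; simp
  | cons x ds ih =>
    intro res hpt
    simp only [List.foldl_cons, List.map_cons, List.sum_cons]
    rw [ih (g res x) (fun y hy => hpt y (List.mem_cons_of_mem _ hy))]
    rw [hpt x (List.mem_cons_self) res]
    ring

-- main characterization of A's recursion
lemma pvRecA_len (l : List Int) (r : Int) (k : Int) (hk : 1 ≤ k) :
    ∀ (fuel : Nat) (i : Int) (a : List Int) (result : List (List Int)),
      0 ≤ i → a.length ≤ k.toNat → k.toNat - a.length ≤ fuel →
      (((pvRecA l r (pvBuildD l) k fuel i a result).length : Int))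
        = (result.length : Int)
          + pvCnt r (k.toNat - a.length) (PySem.List.pyGetD l i 0) (l.drop (i.toNat + 1)) := by
  intro fuel
  induction fuel with
  | zero =>
    intro i a result hi ha hf
    have hlen : a.length = k.toNat := by omega
    rw [pvRecA]
    rw [if_pos (by omega)]
    simp [hlen, pvCnt]
  | succ f ih =>
    intro i a result hi ha hf
    rw [pvRecA]
    by_cases heq : (a.length : Int) = k
    · rw [if_pos heq]
      have : k.toNat - a.length = 0 := by omega
      simp [this, pvCnt]
    · rw [if_neg heq]
      have halt : a.length < k.toNat := by omega
      have hm : k.toNat - a.length = (k.toNat - (a.length + 1)) + 1 := by omega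
      set key := PySem.List.pyGetD l i 0 * r with hkey
      set m' := k.toNat - (a.length + 1) with hm'
      have hchar := pvBuildD_getD l key
      have hsum : ((((pvBuildD l).getD key []).map
          (fun idx => if i < idx then pvCnt r m' (PySem.List.pyGetD l idx 0) (l.drop (idx.toNat + 1)) else 0)).sum)
            = pvS (pvCnt r m') key (l.drop (i.toNat + 1)) := by
        rw [hchar, List.map_map]
        exact pvCrux l r key m' i hi
      have hres : pvCnt r (k.toNat - a.length) (PySem.List.pyGetD l i 0) (l.drop (i.toNat + 1))
          = pvS (pvCnt r m') key (l.drop (i.toNat + 1)) := by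
        rw [hm]; rfl
      by_cases hcont : (pvBuildD l).contains key
      · rw [if_pos hcont]
        rw [pvFoldLen _ (fun idx => if i < idx then pvCnt r m' (PySem.List.pyGetD l idx 0) (l.drop (idx.toNat + 1)) else 0)
            _ result ?_]
        · rw [hsum, hres]
        · intro idx hidx res'
          have hidx0 : 0 ≤ idx := by
            rw [hchar] at hidx
            rcases List.mem_map.1 hidx with ⟨p, hp, rfl⟩
            have := pvEnumerate_fst_bounds l 0 p (List.mem_of_mem_filter hp)
            omega
          by_cases hlt : i < idx
          · have := ih idx (a ++ [idx]) res' hidx0 (by simp; omega) (by simp; omega)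
            simpa [hlt] using this
          · simp [hlt]
      · rw [if_neg (by simpa using hcont)]
        have hempty : (pvBuildD l).getD key [] = [] :=
          PySem.Dict.getD_of_not_contains _ _ (by simpa using hcont)
        rw [hempty] at hsum
        simp only [List.map_nil, List.sum_nil] at hsum
        rw [hres, ← hsum, add_zero]

-- totals: summing chain counts over all start positions
lemma pvTot_eq_sum (r : Int) (m : Nat) :
    ∀ (l : List Int),
      ((List.range l.length).map (fun j => pvCnt r m (l.getD j 0) (l.drop (j + 1)))).sum
        = pvTot r m l := by
  intro l
  induction l with
  | nil => simp [pvTot]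
  | cons x t ih =>
    rw [List.length_cons, List.range_succ_eq_map]
    simp only [List.map_cons, List.map_map, List.sum_cons]
    rw [pvTot, ← ih]
    simp [Function.comp_def]

-- A for k = 0: the recursion never records a tuple
lemma pvRecA_zero (l : List Int) (r : Int) (d : PySem.Dict Int (List Int)) :
    ∀ (fuel : Nat) (i : Int) (a : List Int) (result : List (List Int)),
      a ≠ [] → pvRecA l r d 0 fuel i a result = result := by
  intro fuel
  induction fuel with
  | zero =>
    intro i a result ha
    rw [pvRecA, if_neg (by simpa using ha)]
  | succ f ih =>
    intro i a result ha
    rw [pvRecA, if_neg (by simpa using ha)]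
    simp only
    by_cases hcont : d.contains (PySem.List.pyGetD l i 0 * r)
    · rw [if_pos hcont]
      generalize (d.getD (PySem.List.pyGetD l i 0 * r) []) = ds
      induction ds generalizing result with
      | nil => rfl
      | cons idx ds ihds =>
        rw [List.foldl_cons]
        rw [show (if i < idx then pvRecA l r d 0 f idx (a ++ [idx]) result else result) = result by
          split
          · exact ih idx (a ++ [idx]) result (by simp)
          · rfl]
        exact ihds result
    · rw [if_neg hcont]

-- A computes pvTot for k ≥ 1
lemma pvA_eq_tot (l : List Int) (r : Int) (k : Int) (hk : 1 ≤ k) :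
    find_geometric_progression_k_tuples l r k = pvTot r (k.toNat - 1) l := by
  unfold find_geometric_progression_k_tuples
  rw [if_pos (by omega)]
  simp only
  rw [pvFoldLen _ (fun i => pvCnt r (k.toNat - 1) (PySem.List.pyGetD l i 0) (l.drop (i.toNat + 1))) _ [] ?_]
  · rw [PySem.List.pyRange_zero_nat, List.map_map]
    rw [← pvTot_eq_sum r (k.toNat - 1) l]
    simp only [List.length_nil, Nat.cast_zero, zero_add, Function.comp_def]
    congr 1
    apply List.map_congr_left
    intro j hj
    rw [PySem.List.pyGetD_natCast, Int.toNat_natCast]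
  · intro i hi res'
    have hi0 : 0 ≤ i := by
      rw [PySem.List.pyRange_zero_nat] at hi
      rcases List.mem_map.1 hi with ⟨j, _, rfl⟩
      omega
    have := pvRecA_len l r k hk (l.length + k.toNat) i [i] res' hi0 (by simp; omega) (by simp; omega)
    simpa using this

-- per-position chain counts, aligned with the list
def pvCntList (r : Int) (j : Nat) : List Int → List Int
  | [] => []
  | x :: t => pvCnt r j x t :: pvCntList r j t

lemma pvCntList_length (r : Int) (j : Nat) : ∀ t : List Int, (pvCntList r j t).length = t.length := by
  intro t; induction t with
  | nil => rfl
  | cons x t ih => simp [pvCntList, ih]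

lemma pvCntList_sum (r : Int) (j : Nat) : ∀ t : List Int, (pvCntList r j t).sum = pvTot r j t := by
  intro t; induction t with
  | nil => rfl
  | cons x t ih => rw [pvCntList, List.sum_cons, ih]; rfl

lemma pvCntList_zero (r : Int) : ∀ t : List Int, pvCntList r 0 t = List.replicate t.length 1 := by
  intro t; induction t with
  | nil => rfl
  | cons x t ih => simp [pvCntList, ih, List.replicate_succ, pvCnt]

lemma pvZipReverse {α β : Type} : ∀ (l : List α) (c : List β), l.length = c.length →
    l.reverse.zip c.reverse = (l.zip c).reverse := by
  intro l
  induction l with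
  | nil => intro c h; cases c with
    | nil => rfl
    | cons y c => simp at h
  | cons x l ih =>
    intro c h
    cases c with
    | nil => simp at h
    | cons y c =>
      simp only [List.reverse_cons, List.zip_cons_cons]
      rw [List.zip_append (by simpa using h)]
      rw [ih c (by simpa using h)]
      simp

-- one pass turns the length-(j+1) counts into the length-(j+2) counts
lemma pvAltPass_eq (l : List Int) (r : Int) (j : Nat) :
    pvAltPass l r (pvCntList r j l) = pvCntList r (j + 1) l := by
  unfold pvAltPass
  rw [pvZipReverse l _ (pvCntList_length r j l).symm]
  rw [List.foldl_reverse]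
  have main : ∀ t : List Int,
      ((t.zip (pvCntList r j t)).foldr
        (fun xc (st : PySem.Dict Int Int × List Int) =>
          (st.1.insert xc.1 (st.1.getD xc.1 0 + xc.2), st.2 ++ [st.1.getD (xc.1 * r) 0]))
        (PySem.Dict.empty, [])).2 = (pvCntList r (j + 1) t).reverse ∧
      ∀ w : Int, ((t.zip (pvCntList r j t)).foldr
        (fun xc (st : PySem.Dict Int Int × List Int) =>
          (st.1.insert xc.1 (st.1.getD xc.1 0 + xc.2), st.2 ++ [st.1.getD (xc.1 * r) 0]))
        (PySem.Dict.empty, [])).1.getD w 0 = pvS (pvCnt r j) w t := by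
    intro t
    induction t with
    | nil =>
      refine ⟨rfl, ?_⟩
      intro w
      simp [pvCntList, List.zip_nil_right, PySem.Dict.getD_empty, pvS]
    | cons x t ih =>
      obtain ⟨ih1, ih2⟩ := ih
      rw [pvCntList]
      simp only [List.zip_cons_cons, List.foldr_cons]
      constructor
      · rw [ih1, ih2 (x * r)]
        rw [show pvS (pvCnt r j) (x * r) t = pvCnt r (j + 1) x t from rfl]
        rw [pvCntList]
        simp [List.reverse_cons]
      · intro w
        rw [PySem.Dict.getD_insert]
        rw [pvS]
        by_cases hw : w = x
        · rw [if_pos hw, hw, if_pos rfl, ih2 x]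
          ring
        · rw [if_neg hw, if_neg (fun h => hw h.symm), ih2 w, zero_add]
  rw [(main l).1, List.reverse_reverse]

lemma pvS_nonneg (f : Int → List Int → Int) (hf : ∀ x t, 0 ≤ f x t) (w : Int) :
    ∀ t : List Int, 0 ≤ pvS f w t := by
  intro t; induction t with
  | nil => exact le_refl 0
  | cons x t ih =>
    rw [pvS]
    have : (0 : Int) ≤ if x = w then f x t else 0 := by
      split
      · exact hf x t
      · exact le_refl 0
    omega

lemma pvCnt_nonneg (r : Int) : ∀ (m : Nat) (x : Int) (t : List Int), 0 ≤ pvCnt r m x t := by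
  intro m
  induction m with
  | zero => intro x t; exact zero_le_one
  | succ m ih => intro x t; exact pvS_nonneg _ (fun y u => ih y u) _ t

lemma pvTot_nonneg (r : Int) (m : Nat) : ∀ t : List Int, 0 ≤ pvTot r m t := by
  intro t; induction t with
  | nil => exact le_refl 0
  | cons x t ih =>
    rw [pvTot]
    have := pvCnt_nonneg r m x t
    omega

lemma pvS_le_tot (r : Int) (j : Nat) (w : Int) : ∀ t : List Int,
    pvS (pvCnt r j) w t ≤ pvTot r j t := by
  intro t; induction t with
  | nil => exact le_refl 0
  | cons x t ih =>
    rw [pvS, pvTot]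
    have h1 : (if x = w then pvCnt r j x t else 0) ≤ pvCnt r j x t := by
      split
      · exact le_refl _
      · exact pvCnt_nonneg r j x t
    omega

lemma pvTot_succ_eq_zero (r : Int) (j : Nat) : ∀ t : List Int,
    pvTot r j t = 0 → pvTot r (j + 1) t = 0 := by
  intro t; induction t with
  | nil => intro _; rfl
  | cons x t ih =>
    intro h
    rw [pvTot] at h ⊢
    have hc := pvCnt_nonneg r j x t
    have ht := pvTot_nonneg r j t
    have h2 : pvCnt r (j + 1) x t = 0 := by
      have hle : pvCnt r (j + 1) x t ≤ pvTot r j t := pvS_le_tot r j (x * r) t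
      have := pvCnt_nonneg r (j + 1) x t
      omega
    rw [h2, ih (by omega)]
    rfl

lemma pvTot_add_eq_zero (r : Int) (j : Nat) (t : List Int) (h : pvTot r j t = 0) :
    ∀ i : Nat, pvTot r (j + i) t = 0 := by
  intro i; induction i with
  | zero => exact h
  | succ i ih => exact pvTot_succ_eq_zero r (j + i) t ih

lemma pvLoop_eq (l : List Int) (r : Int) : ∀ (j m : Nat),
    pvAltLoop l r j (pvCntList r m l) = pvTot r (m + j) l := by
  intro j
  induction j with
  | zero => intro m; rw [pvAltLoop, pvCntList_sum]; rfl
  | succ j ih =>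
    intro m
    rw [pvAltLoop]
    simp only [pvAltPass_eq l r m]
    by_cases hall : (pvCntList r (m + 1) l).all (fun c => c == 0)
    · rw [if_pos hall]
      have hz : pvTot r (m + 1) l = 0 := by
        rw [← pvCntList_sum]
        apply List.sum_eq_zero
        intro y hy
        have := List.all_eq_true.1 hall y hy
        simpa using this
      have h0 := pvTot_add_eq_zero r (m + 1) l hz j
      rw [show m + 1 + j = m + (j + 1) by omega] at h0
      exact h0.symm
    · rw [if_neg hall, ih (m + 1)]
      rw [show m + 1 + j = m + (j + 1) by omega]

-- chains longer than the remaining suffix do not exist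
lemma pvCnt_eq_zero (r : Int) : ∀ (m : Nat) (x : Int) (t : List Int),
    t.length < m → pvCnt r m x t = 0 := by
  intro m
  induction m with
  | zero => intro x t h; omega
  | succ m ih =>
    intro x t
    induction t with
    | nil => intro _; simp [pvCnt, pvS]
    | cons y t' iht =>
      intro h
      have htail := iht (by simp at h ⊢; omega)
      rw [pvCnt] at htail ⊢
      rw [pvS, ih y t' (by simp at h; omega), htail]
      simp

lemma pvTot_eq_zero (r : Int) (m : Nat) : ∀ t : List Int,
    t.length ≤ m → pvTot r m t = 0 := by
  intro t
  induction t with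
  | nil => intro _; rfl
  | cons x t' ih =>
    intro h
    rw [pvTot, pvCnt_eq_zero r m x t' (by simp at h; omega), ih (by simp at h; omega)]
    rfl

-- B computes pvTot for 1 ≤ k ≤ len(l)
lemma pvB_eq_tot (l : List Int) (r : Int) (k : Int) (hk : 1 ≤ k) (hn : k ≤ (l.length : Int)) :
    find_geometric_progression_k_tuples_alt l r k = pvTot r (k.toNat - 1) l := by
  unfold find_geometric_progression_k_tuples_alt
  rw [if_neg (by omega)]
  rw [← pvCntList_zero r l, pvLoop_eq l r (k.toNat - 1) 0]
  rw [Nat.zero_add]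

-- ===== VERDICT (by name: the statement is the Claim_ definition above) =====
theorem find_geometric_progression_k_tuples_spec : Claim_equal_find_geometric_progression_k_tuples := by
  intro l r k _ hpre
  unfold Spec_find_geometric_progression_k_tuples
  have hk : 0 ≤ k := hpre
  by_cases hk1 : 1 ≤ k
  · by_cases hn : k ≤ (l.length : Int)
    · rw [pvA_eq_tot l r k hk1, pvB_eq_tot l r k hk1 hn]
    · -- k exceeds the length: no tuple exists, both sides are 0
      rw [pvA_eq_tot l r k hk1]
      rw [pvTot_eq_zero r (k.toNat - 1) l (by omega)]
      unfold find_geometric_progression_k_tuples_alt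
      rw [if_pos (by omega)]
  · -- k = 0
    have hk0 : k = 0 := by omega
    subst hk0
    unfold find_geometric_progression_k_tuples find_geometric_progression_k_tuples_alt
    rw [if_pos le_rfl, if_pos (Or.inl le_rfl)]
    simp only
    rw [show ((PySem.List.pyRange 0 (l.length : Int) 1).foldl
        (fun res i => pvRecA l r (pvBuildD l) 0 (l.length + (0:Int).toNat) i [i] res) []) = ([] : List (List Int)) from ?_]
    · rfl
    · generalize (PySem.List.pyRange 0 (l.length : Int) 1) = ds
      induction ds with
      | nil => rfl
      | cons i ds ihds =>
        rw [List.foldl_cons, pvRecA_zero l r (pvBuildD l) _ i [i] [] (by simp)]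
        exact ihds
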